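-- pv_equiv track=rewrite | github.com/MrIsaar/MachineLearning | playground.py | loopmod
-- ===== SOURCE A (Python) =====
-- def createArray(size,zero=False,transposed = False):
--     arr = []
--     if transposed:
--         for i in range(0,size):
--             arrinner = []
--             for j in range(0,size):
--                 if zero:
--                     arrinner.append(0)
--                 else:
--                     arrinner.append(j + i+1)
--             arr.append(arrinner)
--         return arr
--     for i in range(0,size):
--         arrinner = []
--         for j in range(0,size):
--             if zero:
--                 arrinner.append(0)
--             else:
--                 arrinner.append(j + i+1)
--         arr.append(arrinner)
--     return arr
--
-- def loopmod(size = 512):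
--
--     a = createArray(size)
--     b = createArray(size,transposed=True)
--     c = createArray(size,True)
--
--     for k in range(0,size): # k = 0 -> i = [0,size] and j = [0,size]
--         for i in range(0,k+1):
--             for j in range(0,size):
--                 c[i][j] += a[i][k]*b[k][j]
--     return c
-- ===== SOURCE B (Python) =====
-- def loopmod(size=512):
--     # Closed form: c[i][j] = sum_{k=i}^{size-1} (k+i+1)*(k+j+1), computed in O(1)
--     # per cell via prefix sums of k and k^2 (O(size^2) total instead of O(size^3)).
--     def s1(m):  # sum of k for 0 <= k < m
--         return m * (m - 1) // 2
--     def s2(m):  # sum of k^2 for 0 <= k < m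
--         return m * (m - 1) * (2 * m - 1) // 6
--     out = []
--     for i in range(size):
--         t1 = s1(size) - s1(i)
--         t2 = s2(size) - s2(i)
--         cnt = size - i
--         row = [t2 + (i + j + 2) * t1 + (i + 1) * (j + 1) * cnt for j in range(size)]
--         out.append(row)
--     return out
-- ===== Notes on version B (the rewrite author's own statement) =====
-- stated objective: faster
-- what changed: Replaced A's O(n^3) triple loop that accumulates a[i][k]*b[k][j] into c with a direct O(n^2) construction: each cell is the closed-form sum over k>=i of (k+i+1)(k+j+1), evaluated per row with Gauss-sum and sum-of-squares formulas.
import Mathlib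
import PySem

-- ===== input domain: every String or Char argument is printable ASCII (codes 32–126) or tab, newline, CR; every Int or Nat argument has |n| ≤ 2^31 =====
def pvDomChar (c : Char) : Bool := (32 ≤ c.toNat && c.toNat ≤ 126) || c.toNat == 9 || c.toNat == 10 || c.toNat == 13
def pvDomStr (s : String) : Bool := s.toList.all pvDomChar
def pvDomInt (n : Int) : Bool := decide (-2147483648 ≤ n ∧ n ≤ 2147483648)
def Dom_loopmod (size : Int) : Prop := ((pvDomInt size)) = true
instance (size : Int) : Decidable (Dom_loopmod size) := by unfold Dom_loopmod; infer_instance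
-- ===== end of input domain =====

-- B replaces A's O(n^3) triple loop by a closed-form O(n^2) computation: each cell is
-- sum_{k=i}^{n-1} (k+i+1)(k+j+1), evaluated with the Gauss sum / sum-of-squares formulas.

-- ===== PORT A =====
def createArray (size : Int) (zero : Bool) (transposed : Bool) : List (List Int) :=
  if transposed then
    (PySem.List.pyRange 0 size 1).foldl (fun arr i =>
      arr ++ [(PySem.List.pyRange 0 size 1).foldl (fun arrinner j =>
        arrinner ++ [if zero then 0 else j + i + 1]) []]) []
  else
    (PySem.List.pyRange 0 size 1).foldl (fun arr i =>
      arr ++ [(PySem.List.pyRange 0 size 1).foldl (fun arrinner j =>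
        arrinner ++ [if zero then 0 else j + i + 1]) []]) []

-- c[i][j] read; exact for the nonnegative in-range indices A's loops produce
def getCell (c : List (List Int)) (i j : Int) : Int :=
  PySem.List.pyGetD (PySem.List.pyGetD c i []) j 0

-- c[i][j] = v write; exact for the nonnegative in-range indices A's loops produce
def setCell (c : List (List Int)) (i j : Int) (v : Int) : List (List Int) :=
  c.set i.toNat ((PySem.List.pyGetD c i []).set j.toNat v)

def loopmod (size : Int) : List (List Int) :=
  let a := createArray size false false
  let b := createArray size false true
  let c := createArray size true false
  (PySem.List.pyRange 0 size 1).foldl (fun c k =>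
    (PySem.List.pyRange 0 (k + 1) 1).foldl (fun c i =>
      (PySem.List.pyRange 0 size 1).foldl (fun c j =>
        setCell c i j (getCell c i j + getCell a i k * getCell b k j)) c) c) c

-- ===== PORT B =====
def pvS1 (m : Int) : Int := PySem.Int.floordiv (m * (m - 1)) 2
def pvS2 (m : Int) : Int := PySem.Int.floordiv (m * (m - 1) * (2 * m - 1)) 6

def loopmod_alt (size : Int) : List (List Int) :=
  (PySem.List.pyRange 0 size 1).foldl (fun out i =>
    let t1 := pvS1 size - pvS1 i
    let t2 := pvS2 size - pvS2 i
    let cnt := size - i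
    out ++ [(PySem.List.pyRange 0 size 1).map
      (fun j => t2 + (i + j + 2) * t1 + (i + 1) * (j + 1) * cnt)]) []

-- ===== PRECONDITION & SPEC =====
def Spec_loopmod (size : Int) (out : List (List Int)) : Prop := out = loopmod_alt size
instance (size : Int) (out : List (List Int)) : Decidable (Spec_loopmod size out) := by unfold Spec_loopmod; infer_instance

-- ===== CLAIM (what is proved, stated in full; the proofs are below) =====
def Claim_equal_loopmod : Prop := ∀ (size : Int), Dom_loopmod size → Spec_loopmod size (loopmod size)

-- ===== LEMMAS AND PROOFS =====

-- matrix-as-function view used by the proofs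
def mkMat (n : Nat) (g : Nat → Nat → Int) : List (List Int) :=
  (List.range n).map fun i => (List.range n).map fun j => g i j

theorem mkMat_congr {n : Nat} {g g' : Nat → Nat → Int}
    (h : ∀ i j, i < n → j < n → g i j = g' i j) : mkMat n g = mkMat n g' := by
  unfold mkMat
  refine List.map_congr_left (fun i hi => List.map_congr_left (fun j hj => ?_))
  exact h i j (List.mem_range.mp hi) (List.mem_range.mp hj)

theorem getCell_mkMat {n : Nat} (g : Nat → Nat → Int) {i j : Nat}
    (hi : i < n) (hj : j < n) : getCell (mkMat n g) (i : Int) (j : Int) = g i j := by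
  simp [getCell, mkMat, PySem.List.pyGetD_natCast, List.getD_eq_getElem?_getD, hi, hj]

theorem setCell_mkMat {n : Nat} (g : Nat → Nat → Int) {i j : Nat}
    (hi : i < n) (hj : j < n) (v : Int) :
    setCell (mkMat n g) (i : Int) (j : Int) v =
      mkMat n (fun i' j' => if i' = i ∧ j' = j then v else g i' j') := by
  have hrow : PySem.List.pyGetD (mkMat n g) (i : Int) [] =
      (List.range n).map (fun j => g i j) := by
    simp [mkMat, PySem.List.pyGetD_natCast, List.getD_eq_getElem?_getD, hi]
  unfold setCell
  rw [hrow]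
  simp only [Int.toNat_natCast]
  apply List.ext_getElem
  · simp [mkMat]
  · intro a h1 h2
    simp only [mkMat, List.getElem_set, List.getElem_map, List.getElem_range] at *
    by_cases hai : a = i
    · subst hai
      rw [if_pos rfl]
      apply List.ext_getElem
      · simp
      · intro b hb1 hb2
        simp only [List.getElem_set, List.getElem_map, List.getElem_range]
        by_cases hbj : b = j
        · subst hbj; simp
        · rw [if_neg (by omega)]; simp [hbj]
    · rw [if_neg (by omega)]
      apply List.map_congr_left
      intro b _
      simp [fun h : a = i => hai h]

-- the j-loop over an arbitrary duplicate-free list of in-range column indices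
theorem jloop_mkMat {n : Nat} (w : Nat → Int) {i : Nat} (hi : i < n) :
    ∀ (js : List Nat) (g : Nat → Nat → Int), (∀ j ∈ js, j < n) → js.Nodup →
    js.foldl (fun (c : List (List Int)) (j : Nat) => setCell c (i : Int) (j : Int)
        (getCell c (i : Int) (j : Int) + w j)) (mkMat n g) =
      mkMat n (fun i' j' => if i' = i ∧ j' ∈ js then g i' j' + w j' else g i' j') := by
  intro js
  induction js with
  | nil => intro g _ _; exact (mkMat_congr (fun _ _ _ _ => by simp)).symm
  | cons j0 rest ih =>
    intro g hmem hnd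
    have hj0 : j0 < n := hmem j0 (by simp)
    simp only [List.foldl_cons]
    rw [getCell_mkMat g hi hj0, setCell_mkMat g hi hj0,
      ih _ (fun j hj => hmem j (by simp [hj])) hnd.of_cons]
    apply mkMat_congr
    intro i' j' _ _
    have hj0r : j0 ∉ rest := (List.nodup_cons.mp hnd).1
    by_cases h1 : i' = i
    · subst h1
      by_cases h2 : j' = j0
      · subst h2; simp [hj0r]
      · by_cases h3 : j' ∈ rest <;> simp [h2, h3]
    · simp [h1]

-- the i-loop over an arbitrary duplicate-free list of in-range row indices
theorem iloop_mkMat {n : Nat} (w : Nat → Nat → Int) :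
    ∀ (is : List Nat) (g : Nat → Nat → Int), (∀ i ∈ is, i < n) → is.Nodup →
    is.foldl (fun (c : List (List Int)) (i : Nat) => (List.range n).foldl (fun (c : List (List Int)) (j : Nat) => setCell c (i : Int) (j : Int)
        (getCell c (i : Int) (j : Int) + w i j)) c) (mkMat n g) =
      mkMat n (fun i' j' => if i' ∈ is then g i' j' + w i' j' else g i' j') := by
  intro is
  induction is with
  | nil => intro g _ _; exact (mkMat_congr (fun _ _ _ _ => by simp)).symm
  | cons i0 rest ih =>
    intro g hmem hnd
    have hi0 : i0 < n := hmem i0 (by simp)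
    simp only [List.foldl_cons]
    rw [jloop_mkMat (w i0) hi0 (List.range n) g (fun j hj => List.mem_range.mp hj)
      (List.nodup_range), ih _ (fun i hi => hmem i (by simp [hi])) hnd.of_cons]
    apply mkMat_congr
    intro i' j' _ hj'
    have hi0r : i0 ∉ rest := (List.nodup_cons.mp hnd).1
    by_cases h1 : i' = i0
    · subst h1; simp [hi0r, List.mem_range.mpr hj']
    · by_cases h2 : i' ∈ rest <;> simp [h1, h2]

-- the k-loop: each processed k adds w i j k to all cells with i ≤ k
theorem kloop_mkMat {n : Nat} (w : Nat → Nat → Nat → Int) :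
    ∀ (ks : List Nat) (g : Nat → Nat → Int), (∀ k ∈ ks, k < n) →
    ks.foldl (fun (c : List (List Int)) (k : Nat) => (List.range (k + 1)).foldl
        (fun (c : List (List Int)) (i : Nat) => (List.range n).foldl (fun (c : List (List Int)) (j : Nat) => setCell c (i : Int) (j : Int)
          (getCell c (i : Int) (j : Int) + w i j k)) c) c) (mkMat n g) =
      mkMat n (fun i j =>
        g i j + ((ks.filter (fun k => i ≤ k)).map (fun k => w i j k)).sum) := by
  intro ks
  induction ks with
  | nil => intro g _; exact (mkMat_congr (fun _ _ _ _ => by simp)).symm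
  | cons k0 rest ih =>
    intro g hmem
    have hk0 : k0 < n := hmem k0 (by simp)
    simp only [List.foldl_cons]
    rw [iloop_mkMat (fun i j => w i j k0) (List.range (k0 + 1)) g
      (fun i hi => lt_of_lt_of_le (List.mem_range.mp hi) hk0) List.nodup_range,
      ih _ (fun k hk => hmem k (by simp [hk]))]
    apply mkMat_congr
    intro i j _ _
    by_cases h : i ≤ k0
    · simp only [List.filter_cons, decide_eq_true_eq, if_pos h, List.map_cons,
        List.sum_cons, List.mem_range.mpr (Nat.lt_succ_of_le h), if_pos]
      ring
    · have : ¬ i ∈ List.range (k0 + 1) := by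
        simp only [List.mem_range]; omega
      simp only [List.filter_cons, decide_eq_true_eq, if_neg h, if_neg this]

-- createArray in mkMat form (both branches of A's 'transposed' produce the same matrix)
theorem createArray_eq (size : Int) (zero : Bool) (transposed : Bool) :
    createArray size zero transposed =
      mkMat size.toNat (fun i j => if zero then 0 else (j : Int) + (i : Int) + 1) := by
  have hr : PySem.List.pyRange 0 size 1 =
      (List.range size.toNat).map (fun (k : Nat) => (k : Int)) := by
    by_cases h : 0 ≤ size
    · conv_lhs => rw [show size = ((size.toNat : Int)) by omega]
      exact PySem.List.pyRange_zero_natCast size.toNat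
    · rw [PySem.List.pyRange_one_eq_nil (by omega),
        show size.toNat = 0 by omega]
      simp
  unfold createArray mkMat
  rw [hr]
  cases transposed <;>
    simp only [List.foldl_map, PySem.List.foldl_append_singleton_eq_map,
      List.nil_append] <;> rfl

-- Gauss sums with Python floor division
theorem pvS1_natCast (m : Nat) :
    pvS1 (m : Int) = ((List.range m).map (fun (k : Nat) => (k : Int))).sum := by
  have h2 : ((List.range m).map (fun (k : Nat) => (k : Int))).sum * 2 = (m : Int) * ((m : Int) - 1) := by
    induction m with
    | zero => simp
    | succ m ih => rw [List.range_succ]; push_cast; simp only [List.map_append,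
        List.sum_append, List.map_cons, List.map_nil, List.sum_cons, List.sum_nil]
                   push_cast at ih ⊢; linarith
  unfold pvS1
  rw [PySem.Int.floordiv_eq_ediv_of_pos (by norm_num)]
  omega

theorem pvS2_natCast (m : Nat) :
    pvS2 (m : Int) = ((List.range m).map (fun (k : Nat) => (k : Int) * (k : Int))).sum := by
  have h6 : ((List.range m).map (fun (k : Nat) => (k : Int) * (k : Int))).sum * 6 =
      (m : Int) * ((m : Int) - 1) * (2 * (m : Int) - 1) := by
    induction m with
    | zero => simp
    | succ m ih => rw [List.range_succ]; push_cast; simp only [List.map_append,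
        List.sum_append, List.map_cons, List.map_nil, List.sum_cons, List.sum_nil]
                   push_cast at ih ⊢; linarith
  unfold pvS2
  rw [PySem.Int.floordiv_eq_ediv_of_pos (by norm_num)]
  omega

-- termwise closed form: sum over range m of (k+i+1)(k+j+1)
theorem prefix_sum_eq (i j : Nat) (m : Nat) :
    ((List.range m).map (fun (k : Nat) => ((k : Int) + i + 1) * ((j : Int) + k + 1))).sum =
      pvS2 (m : Int) + ((i : Int) + j + 2) * pvS1 (m : Int) +
        ((i : Int) + 1) * ((j : Int) + 1) * m := by
  rw [pvS1_natCast, pvS2_natCast]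
  induction m with
  | zero => simp
  | succ m ih =>
    rw [List.range_succ]
    simp only [List.map_append, List.sum_append, List.map_cons, List.map_nil,
      List.sum_cons, List.sum_nil]
    push_cast
    push_cast at ih
    linarith

-- the filtered sum A accumulates equals the difference of two prefix sums
theorem filter_sum_eq (i j : Nat) (n : Nat) (hin : i ≤ n) :
    (((List.range n).filter (fun k => i ≤ k)).map
        (fun (k : Nat) => ((k : Int) + i + 1) * ((j : Int) + k + 1))).sum =
      ((List.range n).map (fun (k : Nat) => ((k : Int) + i + 1) * ((j : Int) + k + 1))).sum -
        ((List.range i).map (fun (k : Nat) => ((k : Int) + i + 1) * ((j : Int) + k + 1))).sum := by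
  induction n with
  | zero =>
    have : i = 0 := Nat.le_zero.mp hin
    subst this; simp
  | succ n ih =>
    rcases Nat.lt_or_ge n i with h | h
    · have hi : i = n + 1 := by omega
      subst hi
      have : (List.range (n + 1)).filter (fun k => n + 1 ≤ k) = [] := by
        apply List.filter_eq_nil_iff.mpr
        intro k hk
        simp only [decide_eq_true_eq]
        exact fun hle => absurd (List.mem_range.mp hk) (by omega)
      rw [this]; simp
    · rw [List.range_succ, List.filter_append, List.map_append, List.sum_append,
        ih h]
      simp only [List.filter_cons, List.filter_nil, decide_eq_true_eq, if_pos h,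
        List.map_append, List.map_cons, List.map_nil, List.sum_append, List.sum_cons,
        List.sum_nil]
      ring

-- ===== VERDICT (by name: the statement is the Claim_ definition above) =====
theorem loopmod_spec : Claim_equal_loopmod := by
  intro size _
  unfold Spec_loopmod
  set n := size.toNat with hn
  have hr : PySem.List.pyRange 0 size 1 =
      (List.range n).map (fun (k : Nat) => (k : Int)) := by
    by_cases h : 0 ≤ size
    · conv_lhs => rw [show size = ((n : Int)) by omega]
      exact PySem.List.pyRange_zero_natCast n
    · rw [PySem.List.pyRange_one_eq_nil (by omega), show n = 0 by omega]
      simp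
  have hbody : ∀ k : Nat, PySem.List.pyRange 0 ((k : Int) + 1) 1 =
      (List.range (k + 1)).map (fun (x : Nat) => (x : Int)) := by
    intro k
    have := PySem.List.pyRange_zero_natCast (k + 1)
    rwa [show ((k + 1 : Nat) : Int) = (k : Int) + 1 by push_cast; ring] at this
  -- evaluate A to a sum per cell
  have hA : loopmod size = mkMat n (fun i j =>
      (((List.range n).filter (fun k => i ≤ k)).map
        (fun (k : Nat) => ((k : Int) + i + 1) * ((j : Int) + k + 1))).sum) := by
    unfold loopmod
    simp only [createArray_eq, ← hn, Bool.false_eq_true, if_false, if_true]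
    rw [hr]
    simp only [List.foldl_map, hbody]
    rw [kloop_mkMat (n := n)
      (fun i j k => getCell (mkMat n fun i j => (j : Int) + (i : Int) + 1) (i : Int) (k : Int) *
        getCell (mkMat n fun i j => (j : Int) + (i : Int) + 1) (k : Int) (j : Int))
      (List.range n) _ (fun k hk => List.mem_range.mp hk)]
    apply mkMat_congr
    intro i j hi hj
    rw [zero_add]
    apply congrArg
    apply List.map_congr_left
    intro k hk
    have hkn : k < n := List.mem_range.mp (List.mem_of_mem_filter hk)
    rw [getCell_mkMat _ hi hkn, getCell_mkMat _ hkn hj]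
  -- evaluate B to its closed form per cell
  have hB : loopmod_alt size = mkMat n (fun i j =>
      pvS2 size - pvS2 (i : Int) + ((i : Int) + (j : Int) + 2) * (pvS1 size - pvS1 (i : Int)) +
        ((i : Int) + 1) * ((j : Int) + 1) * (size - (i : Int))) := by
    unfold loopmod_alt
    rw [hr]
    simp only [List.foldl_map, PySem.List.foldl_append_singleton_eq_map,
      List.nil_append, List.map_map, Function.comp_def, mkMat]
  rw [hA, hB]
  apply mkMat_congr
  intro i j hi hj
  have hsize : size = (n : Int) := by omega
  rw [filter_sum_eq i j n (Nat.le_of_lt hi), prefix_sum_eq, prefix_sum_eq, hsize]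
  ring
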